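-- pv_equiv track=rewrite | github.com/snipeso/pvt | trigger.py | id2triggers
-- ===== SOURCE A (Python) =====
-- BASE = 63  # this because BrainAmp uses 255 for reset; otherwise would have used 64
--
-- def id2triggers(i):
--     if i < 0:
--         raise ValueError("Ids can only be positive")
--
--     triggers = []
--
--     # split number in base 64
--     n = i
--     remainder = 0
--
--     while n > 0:
--         remainder = n % BASE
--         n = n // BASE
--         triggers.insert(0, remainder)
--
--     if not triggers:
--         triggers = [0]
--
--     # flip leftmost bit to 1
--
--     triggers = [t + 128 for t in triggers]
--
--     # flip the second-to-leftmost bit of the last trigger (byte)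
--     triggers[-1] += 64
--
--     return triggers
-- ===== SOURCE B (Python) =====
-- BASE = 63
--
-- def digits(n):
--     return digits(n // BASE) + [n % BASE] if n > 0 else []
--
-- def id2triggers(i):
--     if i < 0:
--         raise ValueError("Ids can only be positive")
--     ds = digits(i) or [0]
--     return [d + 128 for d in ds[:-1]] + [ds[-1] + 192]
-- ===== Notes on version B (the rewrite author's own statement) =====
-- stated objective: alternative
-- what changed: Replaces the while-loop that inserts digits at the front and then patches the last byte in place by a recursive most-significant-first digit helper plus a single construction that adds the marker offsets to the leading bytes and the final byte directly.
import Mathlib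
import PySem

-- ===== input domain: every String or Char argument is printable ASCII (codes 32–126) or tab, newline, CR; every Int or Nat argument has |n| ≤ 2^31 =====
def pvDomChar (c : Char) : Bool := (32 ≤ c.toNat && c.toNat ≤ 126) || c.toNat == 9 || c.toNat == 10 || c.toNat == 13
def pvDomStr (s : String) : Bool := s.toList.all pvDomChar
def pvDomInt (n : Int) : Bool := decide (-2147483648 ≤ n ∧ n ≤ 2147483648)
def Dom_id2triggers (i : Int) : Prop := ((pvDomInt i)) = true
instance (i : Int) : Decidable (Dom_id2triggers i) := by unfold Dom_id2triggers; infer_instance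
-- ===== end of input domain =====

-- B replaces A's front-inserting while-loop and in-place last-byte patch by a recursive
-- most-significant-first digit helper and direct construction (alternative decomposition).


-- ===== PORT A =====
-- the while-loop: triggers.insert(0, n % 63); n = n // 63
def aLoop (n : Int) (triggers : List Int) : List Int :=
  if h : n > 0 then
    aLoop (PySem.Int.floordiv n 63) ((PySem.Int.mod n 63) :: triggers)
  else triggers
termination_by n.toNat
decreasing_by
  have h1 : PySem.Int.floordiv n 63 < n := by
    rw [PySem.Int.floordiv_lt_iff_lt_mul (by omega)]; nlinarith
  have h2 : (0:Int) ≤ PySem.Int.floordiv n 63 := by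
    rw [PySem.Int.le_floordiv_iff_mul_le (by omega)]; omega
  omega

-- triggers[-1] += 64 (triggers is nonempty at that point)
def addLast64 : List Int → List Int
  | [] => []
  | [x] => [x + 64]
  | x :: y :: rest => x :: addLast64 (y :: rest)

def id2triggers (i : Int) : List Int :=
  let triggers := aLoop i []
  let triggers := if triggers = [] then [0] else triggers
  let triggers := triggers.map (· + 128)
  addLast64 triggers

-- ===== PORT B =====
def bDigits (n : Int) : List Int :=
  if h : n > 0 then
    bDigits (PySem.Int.floordiv n 63) ++ [PySem.Int.mod n 63]
  else []
termination_by n.toNat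
decreasing_by
  have h1 : PySem.Int.floordiv n 63 < n := by
    rw [PySem.Int.floordiv_lt_iff_lt_mul (by omega)]; nlinarith
  have h2 : (0:Int) ≤ PySem.Int.floordiv n 63 := by
    rw [PySem.Int.le_floordiv_iff_mul_le (by omega)]; omega
  omega

def id2triggers_alt (i : Int) : List Int :=
  let ds := bDigits i
  let ds := if ds = [] then [0] else ds
  (ds.dropLast.map (· + 128)) ++ [ds.getLast! + 192]

-- ===== PRECONDITION & SPEC =====
-- A (and B alike) raise ValueError on negative ids; Pre_ excludes exactly those inputs.
def Pre_id2triggers (i : Int) : Prop := 0 ≤ i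
instance (i : Int) : Decidable (Pre_id2triggers i) := by unfold Pre_id2triggers; infer_instance
def pvWitness_id2triggers : Int := (5)

def Spec_id2triggers (i : Int) (out : List Int) : Prop := out = id2triggers_alt i
instance (i : Int) (out : List Int) : Decidable (Spec_id2triggers i out) := by unfold Spec_id2triggers; infer_instance

-- ===== CLAIM (what is proved, stated in full; the proofs are below) =====
def Claim_equal_id2triggers : Prop := ∀ (i : Int), Dom_id2triggers i → Pre_id2triggers i → Spec_id2triggers i (id2triggers i)

-- ===== LEMMAS AND PROOFS =====
theorem aLoop_eq_bDigits (n : Int) (acc : List Int) : aLoop n acc = bDigits n ++ acc := by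
  fun_induction aLoop n acc with
  | case1 n acc h ih =>
      rw [bDigits, dif_pos h, ih, List.append_assoc]; rfl
  | case2 n acc h =>
      rw [bDigits, dif_neg h]; rfl

theorem addLast64_map : ∀ (L : List Int), L ≠ [] →
    addLast64 (L.map (· + 128)) = (L.dropLast.map (· + 128)) ++ [L.getLast! + 192]
  | [x], _ => by simp [addLast64, List.getLast!]; ring
  | x :: y :: ys, _ => by
      have ih := addLast64_map (y :: ys) (by simp)
      simp only [List.map_cons] at ih ⊢
      show (x + 128) :: addLast64 ((y + 128) :: List.map (· + 128) ys) = _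
      rw [ih]
      simp [List.getLast!]

-- ===== VERDICT (by name: the statement is the Claim_ definition above) =====
theorem id2triggers_spec : Claim_equal_id2triggers := by
  intro i _ _
  show id2triggers i = id2triggers_alt i
  unfold id2triggers id2triggers_alt
  rw [aLoop_eq_bDigits i [], List.append_nil]
  apply addLast64_map
  split <;> simp_all
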